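-- pv_equiv track=rewrite | github.com/ARCAlhau80/LotoScope | meta_analise_filtros.py | filtro_consecutivos
-- ===== SOURCE A (Python) =====
-- def filtro_consecutivos(nums, max_cons=5):
--     """Máximo de consecutivos"""
--     nums_sorted = sorted(nums)
--     max_seq = 1
--     seq_atual = 1
--     for i in range(1, len(nums_sorted)):
--         if nums_sorted[i] == nums_sorted[i-1] + 1:
--             seq_atual += 1
--             max_seq = max(max_seq, seq_atual)
--         else:
--             seq_atual = 1
--     return max_seq <= max_cons
-- ===== SOURCE B (Python) =====
-- def filtro_consecutivos(nums, max_cons=5):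
--     """Maximo de consecutivos (break-point formulation): list the indices where
--     the sorted sequence stops being prev+1, turn them into run boundaries, and
--     take the widest gap between consecutive boundaries."""
--     s = sorted(nums)
--     bounds = [0] + [i for i in range(1, len(s)) if s[i] != s[i - 1] + 1] + [len(s)]
--     longest = max(1, max(b - a for a, b in zip(bounds, bounds[1:])))
--     return longest <= max_cons
-- ===== Notes on version B (the rewrite author's own statement) =====
-- stated objective: alternative
-- what changed: Instead of scanning with a running counter and running maximum, B collects the break indices (where the sorted value is not prev+1), forms the boundary list of zero, the breaks and the length, and takes the widest gap between consecutive boundaries.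
import Mathlib
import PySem

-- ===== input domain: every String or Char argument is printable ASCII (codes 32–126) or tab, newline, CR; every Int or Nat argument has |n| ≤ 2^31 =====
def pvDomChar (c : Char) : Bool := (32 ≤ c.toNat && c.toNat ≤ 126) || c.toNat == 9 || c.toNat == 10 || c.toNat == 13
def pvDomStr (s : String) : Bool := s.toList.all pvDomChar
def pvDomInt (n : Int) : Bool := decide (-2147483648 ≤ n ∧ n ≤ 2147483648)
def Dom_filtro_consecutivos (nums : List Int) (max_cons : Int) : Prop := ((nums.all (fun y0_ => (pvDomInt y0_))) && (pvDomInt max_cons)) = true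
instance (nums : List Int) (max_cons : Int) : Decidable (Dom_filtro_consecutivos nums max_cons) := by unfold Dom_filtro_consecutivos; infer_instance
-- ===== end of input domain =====

-- B replaces A's running-counter/running-maximum scan by a break-point formulation
-- (boundary list + widest gap); objective: alternative decomposition, same cost.

-- ===== PORT A =====
def filtro_consecutivos (nums : List Int) (max_cons : Int) : Bool :=
  let nums_sorted := PySem.List.sorted nums (fun x => x) false
  let st := (PySem.List.pyRange 1 (nums_sorted.length : Int) 1).foldl
    (fun (p : Int × Int) i =>
      if PySem.List.pyGetD nums_sorted i 0 == PySem.List.pyGetD nums_sorted (i - 1) 0 + 1 then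
        (max p.1 (p.2 + 1), p.2 + 1)
      else (p.1, 1)) (1, 1)
  decide (st.1 ≤ max_cons)

-- ===== PORT B =====
def filtro_consecutivos_alt (nums : List Int) (max_cons : Int) : Bool :=
  let s := PySem.List.sorted nums (fun x => x) false
  let n : Int := s.length
  let bounds : List Int :=
    0 :: ((PySem.List.pyRange 1 n 1).filter
      (fun i => !(PySem.List.pyGetD s i 0 == PySem.List.pyGetD s (i - 1) 0 + 1)) ++ [n])
  let diffs := (bounds.zip bounds.tail).map (fun p : Int × Int => p.2 - p.1)
  -- the inner max(...) is over a list that is always nonempty (bounds has ≥ 2 entries), so .getD is never taken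
  let longest := max 1 ((PySem.List.max? diffs (fun y => y)).getD 1)
  decide (longest ≤ max_cons)

-- ===== PRECONDITION & SPEC =====
def Spec_filtro_consecutivos (nums : List Int) (max_cons : Int) (out : Bool) : Prop := out = filtro_consecutivos_alt nums max_cons
instance (nums : List Int) (max_cons : Int) (out : Bool) : Decidable (Spec_filtro_consecutivos nums max_cons out) := by unfold Spec_filtro_consecutivos; infer_instance

-- ===== CLAIM (what is proved, stated in full; the proofs are below) =====
def Claim_equal_filtro_consecutivos : Prop := ∀ (nums : List Int) (max_cons : Int), Dom_filtro_consecutivos nums max_cons → Spec_filtro_consecutivos nums max_cons (filtro_consecutivos nums max_cons)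

-- ===== LEMMAS AND PROOFS =====

/-- last element of `d :: bs`. -/
def lastD (d : Int) : List Int → Int
  | [] => d
  | x :: xs => lastD x xs

/-- max of the consecutive differences of `prev :: bs ++ [fin]`. -/
def gapsMax (prev : Int) : List Int → Int → Int
  | [], fin => fin - prev
  | b :: bs, fin => max (b - prev) (gapsMax b bs fin)

theorem lastD_append (d b : Int) (bs : List Int) : lastD d (bs ++ [b]) = b := by
  induction bs generalizing d with
  | nil => rfl
  | cons x xs ih => simpa [lastD] using ih x

theorem gapsMax_append (prev b fin : Int) (bs : List Int) :
    gapsMax prev (bs ++ [b]) fin = max (gapsMax prev bs b) (fin - b) := by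
  induction bs generalizing prev with
  | nil => simp [gapsMax]
  | cons x xs ih => simp [gapsMax, ih, max_assoc]

theorem gapsMax_succ (p k : Int) (bs : List Int) :
    max (gapsMax p bs k) (k + 1 - lastD p bs) = gapsMax p bs (k + 1) := by
  induction bs generalizing p with
  | nil => simp [gapsMax, lastD]
  | cons x xs ih =>
    simp only [gapsMax, lastD, max_assoc, ih]

theorem foldA_eq (f : Int → Bool) (k : Nat) :
    (PySem.List.pyRange 1 (k : Int) 1).foldl
      (fun (p : Int × Int) i => if f i then (max p.1 (p.2 + 1), p.2 + 1) else (p.1, 1)) (1, 1)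
    = (max 1 (gapsMax 0 ((PySem.List.pyRange 1 (k : Int) 1).filter (fun i => !(f i))) (k : Int)),
       if k = 0 then 1
       else (k : Int) - lastD 0 ((PySem.List.pyRange 1 (k : Int) 1).filter (fun i => !(f i)))) := by
  induction k with
  | zero =>
    rw [PySem.List.pyRange_one_eq_nil (by norm_num)]
    simp [gapsMax]
  | succ k ih =>
    by_cases hk : k = 0
    · subst hk
      have hnil : PySem.List.pyRange 1 ((0 + 1 : Nat) : Int) 1 = [] :=
        PySem.List.pyRange_one_eq_nil (by norm_num)
      rw [hnil]
      simp [gapsMax, lastD]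
    · have h1 : (1 : Int) ≤ (k : Int) := by omega
      have hsplit : PySem.List.pyRange 1 (((k + 1 : Nat)) : Int) 1
          = PySem.List.pyRange 1 (k : Int) 1 ++ [(k : Int)] := by
        have := PySem.List.pyRange_one_succ_right (a := 1) (b := (k : Int)) h1
        push_cast
        simpa using this
      rw [hsplit, List.foldl_append, ih, List.filter_append]
      set bs := (PySem.List.pyRange 1 (k : Int) 1).filter (fun i => !(f i)) with hbs
      simp only [List.filter_cons, List.filter_nil, List.foldl_cons, List.foldl_nil, hk, if_false]
      have hcast : (((k + 1 : Nat)) : Int) = (k : Int) + 1 := by push_cast; ring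
      rw [hcast]
      by_cases hf : f (k : Int)
      · have hm := gapsMax_succ 0 (k : Int) bs
        simp only [hf, Bool.not_true, if_true, Bool.false_eq_true, if_false, List.append_nil,
          Nat.add_eq_zero_iff, one_ne_zero, and_false]
        rw [Prod.mk.injEq]
        constructor
        · rw [show (k : Int) - lastD 0 bs + 1 = (k : Int) + 1 - lastD 0 bs by ring]
          rw [max_assoc, hm]
        · ring
      · have hf2 : f (k : Int) = false := by simpa using hf
        simp only [hf2, Bool.not_false, if_true, Bool.false_eq_true, if_false,
          Nat.add_eq_zero_iff, one_ne_zero, and_false]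
        rw [Prod.mk.injEq]
        constructor
        · rw [gapsMax_append]
          generalize gapsMax 0 bs (k : Int) = G
          rw [show (k : Int) + 1 - (k : Int) = 1 by ring]
          omega
        · rw [lastD_append]
          ring

theorem max?_diffs (bs : List Int) (prev fin : Int) :
    (PySem.List.max? (((prev :: (bs ++ [fin])).zip (bs ++ [fin])).map
        (fun p : Int × Int => p.2 - p.1)) (fun y => y)).getD 1
      = gapsMax prev bs fin := by
  induction bs generalizing prev with
  | nil =>
    simp [PySem.List.max?_id_cons, gapsMax]
  | cons b bs ih =>
    have ihb := ih b
    cases hb : bs ++ [fin] with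
    | nil => exact absurd hb (by simp)
    | cons y t =>
      rw [hb] at ihb
      rw [List.cons_append, hb]
      simp only [List.zip_cons_cons, List.map_cons, PySem.List.max?_id_cons,
        Option.getD_some, List.foldl_cons] at ihb ⊢
      rw [gapsMax, ← ihb]
      exact List.foldl_assoc

-- ===== VERDICT (by name: the statement is the Claim_ definition above) =====
theorem filtro_consecutivos_spec : Claim_equal_filtro_consecutivos := by
  intro nums max_cons _
  unfold Spec_filtro_consecutivos filtro_consecutivos filtro_consecutivos_alt
  simp only []
  set s := PySem.List.sorted nums (fun x => x) false with hs
  rw [foldA_eq (fun i => PySem.List.pyGetD s i 0 == PySem.List.pyGetD s (i - 1) 0 + 1) s.length]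
  rw [List.tail_cons, max?_diffs]
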